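-- pv_equiv track=rewrite | github.com/jinha2536/mdm-arithmetic | diffusion-arithmetic/experiments/exp_countdown.py | build_oracle_order_step_seq
-- ===== SOURCE A (Python) =====
-- POS_PLAN = 'plan'
--
-- POS_CALC = 'calc'
--
-- POS_SEP = 'sep'
--
-- def classify_output_positions(output_str):
--     types = []
--     steps = output_str.split(',')
--     for si, step in enumerate(steps):
--         eq_pos = step.find('=')
--         if eq_pos < 0:
--             types.extend([POS_PLAN] * len(step))
--         else:
--             types.extend([POS_PLAN] * eq_pos)
--             types.append(POS_SEP)
--             types.extend([POS_CALC] * (len(step) - eq_pos - 1))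
--         if si < len(steps) - 1:
--             types.append(POS_SEP)
--     return types
--
-- def build_oracle_order_step_seq(output_str):
--     """Step-sequential oracle: step1 plan→sep→calc, then step2, ..."""
--     types = classify_output_positions(output_str)
--     order = []
--     steps_raw = output_str.split(',')
--     for si, step_str in enumerate(steps_raw):
--         start = sum(len(s) + 1 for s in steps_raw[:si])
--         step_len = len(step_str)
--         step_range = list(range(start, start + step_len))
--         step_types = types[start:start + step_len]
--         plan_pos = [p for p, t in zip(step_range, step_types) if t == POS_PLAN]
--         sep_pos = [p for p, t in zip(step_range, step_types) if t == POS_SEP]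
--         calc_pos = [p for p, t in zip(step_range, step_types) if t == POS_CALC]
--         order.extend(plan_pos + sep_pos + calc_pos)
--         if si < len(steps_raw) - 1:
--             comma_pos = start + step_len
--             order.append(comma_pos)
--     return order
-- ===== SOURCE B (Python) =====
-- def build_oracle_order_step_seq(output_str):
--     """Step-sequential oracle: within each step the plan positions precede the
--     '=' separator, which precedes the calc positions, and the comma follows the
--     step - so the oracle order is simply every output position in increasing
--     order.  One pass over the parts computes the total count."""
--     parts = output_str.split(',')
--     total = sum(map(len, parts)) + len(parts) - 1
--     return list(range(total))
-- ===== Notes on version B (the rewrite author's own statement) =====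
-- stated objective: faster
-- what changed: Replaces the classify/slice/filter machinery and the per-step prefix-length re-summing with the observation that positions are emitted in strictly increasing consecutive order, so the result is just range(total length), computed in one pass over the split parts.
import Mathlib
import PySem

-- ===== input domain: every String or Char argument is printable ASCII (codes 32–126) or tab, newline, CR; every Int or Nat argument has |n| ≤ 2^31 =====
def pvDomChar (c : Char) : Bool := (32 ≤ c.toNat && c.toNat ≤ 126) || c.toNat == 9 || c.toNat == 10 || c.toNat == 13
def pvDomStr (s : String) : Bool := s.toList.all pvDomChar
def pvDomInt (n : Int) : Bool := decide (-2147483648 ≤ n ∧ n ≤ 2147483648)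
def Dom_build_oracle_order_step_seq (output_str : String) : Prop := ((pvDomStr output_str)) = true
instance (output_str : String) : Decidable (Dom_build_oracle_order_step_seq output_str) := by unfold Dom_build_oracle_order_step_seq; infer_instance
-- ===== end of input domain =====

-- B replaces A's per-step classify/slice/filter passes and prefix re-summing by the closed form
-- range(total length), computed in one pass over the split parts (measured faster, asymptotic).


-- ===== PORT A =====
def POS_PLAN : String := "plan"
def POS_CALC : String := "calc"
def POS_SEP : String := "sep"

def classify_output_positions (output_str : String) : List String :=
  let steps := (PySem.Str.split? output_str ",").getD []
  (PySem.List.enumerate steps 0).foldl (fun types si_step =>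
    let si := si_step.1
    let step := si_step.2
    let eq_pos := PySem.Str.find step "="
    let types :=
      if eq_pos < 0 then
        types ++ List.replicate (PySem.Str.len step).toNat POS_PLAN
      else
        (types ++ List.replicate eq_pos.toNat POS_PLAN ++ [POS_SEP])
          ++ List.replicate ((PySem.Str.len step) - eq_pos - 1).toNat POS_CALC
    if si < (steps.length : Int) - 1 then types ++ [POS_SEP] else types) []

def build_oracle_order_step_seq (output_str : String) : List Int :=
  let types := classify_output_positions output_str
  let steps_raw := (PySem.Str.split? output_str ",").getD []
  (PySem.List.enumerate steps_raw 0).foldl (fun order si_step =>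
    let si := si_step.1
    let step_str := si_step.2
    let start := ((PySem.List.slice steps_raw none (some si)).map (fun s => PySem.Str.len s + 1)).sum
    let step_len := PySem.Str.len step_str
    let step_range := PySem.List.pyRange start (start + step_len) 1
    let step_types := PySem.List.slice types (some start) (some (start + step_len))
    let plan_pos := (step_range.zip step_types).filterMap (fun pt => if pt.2 = POS_PLAN then some pt.1 else none)
    let sep_pos := (step_range.zip step_types).filterMap (fun pt => if pt.2 = POS_SEP then some pt.1 else none)
    let calc_pos := (step_range.zip step_types).filterMap (fun pt => if pt.2 = POS_CALC then some pt.1 else none)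
    let order := order ++ (plan_pos ++ sep_pos ++ calc_pos)
    if si < (steps_raw.length : Int) - 1 then order ++ [start + step_len] else order) []

-- ===== PORT B =====
def build_oracle_order_step_seq_alt (output_str : String) : List Int :=
  let parts := (PySem.Str.split? output_str ",").getD []
  let total := (parts.map PySem.Str.len).sum + (parts.length : Int) - 1
  PySem.List.pyRange 0 total 1

-- ===== PRECONDITION & SPEC =====
def Spec_build_oracle_order_step_seq (output_str : String) (out : List Int) : Prop := out = build_oracle_order_step_seq_alt output_str
instance (output_str : String) (out : List Int) : Decidable (Spec_build_oracle_order_step_seq output_str out) := by unfold Spec_build_oracle_order_step_seq; infer_instance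

-- ===== CLAIM (what is proved, stated in full; the proofs are below) =====
def Claim_equal_build_oracle_order_step_seq : Prop := ∀ (output_str : String), Dom_build_oracle_order_step_seq output_str → Spec_build_oracle_order_step_seq output_str (build_oracle_order_step_seq output_str)

-- ===== LEMMAS AND PROOFS =====

-- The plan/sep/calc block classify appends for one step p (before the inter-step comma).
def pvBlk (p : String) : List String :=
  if PySem.Str.find p "=" < 0 then List.replicate (PySem.Str.len p).toNat POS_PLAN
  else List.replicate (PySem.Str.find p "=").toNat POS_PLAN ++ [POS_SEP]
       ++ List.replicate ((PySem.Str.len p) - (PySem.Str.find p "=") - 1).toNat POS_CALC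

-- The whole types list: the steps' blocks joined by "sep" entries for the commas.
def pvTypes : List String → List String
  | [] => []
  | p :: rest => if rest = [] then pvBlk p else (pvBlk p ++ [POS_SEP]) ++ pvTypes rest

-- Character count consumed by a prefix of steps: each step plus its comma.
def pvNatStart (l : List String) : Nat := (l.map (fun s => s.toList.length + 1)).sum

lemma pvFind_cases (p : String) :
    PySem.Str.find p "=" = -1 ∨
      (0 ≤ PySem.Str.find p "=" ∧ (PySem.Str.find p "=").toNat < p.toList.length) := by
  by_cases h : PySem.Str.find p "=" = -1
  · exact Or.inl h
  · right
    have hf : PySem.Str.find p "=" = PySem.Chars.find p.toList "=".toList := by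
      simp
    have h0 : PySem.Chars.findFrom p.toList "=".toList ((0:Nat):Int) ≠ -1 := by
      simpa [PySem.Chars.findFrom_zero, ← hf] using h
    obtain ⟨h1, h2, -⟩ :=
      PySem.Chars.findFrom_natCast_spec p.toList "=".toList 0 (Nat.zero_le _) h0
    rw [show ((0:Nat):Int) = 0 by norm_num, PySem.Chars.findFrom_zero] at h1 h2
    rw [hf]
    have hl := h2.length_le
    simp [List.length_drop] at hl ⊢
    constructor
    · exact_mod_cast h1
    · omega

lemma pvBlk_len (p : String) : (pvBlk p).length = p.toList.length := by
  unfold pvBlk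
  rcases pvFind_cases p with h | ⟨h1, h2⟩
  · rw [if_pos (by omega)]
    simp [PySem.Str.len_eq]
  · rw [if_neg (by omega)]
    simp only [List.length_append, List.length_replicate, List.length_singleton,
      PySem.Str.len_eq]
    omega

lemma pvFz_eq (xs : List Int) (t : String) :
    (xs.zip (List.replicate xs.length t)).filterMap
      (fun pt => if pt.2 = t then some pt.1 else none) = xs := by
  induction xs with
  | nil => simp
  | cons x xs ih => simp [List.replicate_succ, ih]

lemma pvFz_ne (xs : List Int) (t u : String) (h : ¬ (u = t)) :
    (xs.zip (List.replicate xs.length u)).filterMap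
      (fun pt => if pt.2 = t then some pt.1 else none) = [] := by
  induction xs with
  | nil => simp
  | cons x xs ih => simp [List.replicate_succ, ih, h]

lemma pvNatStart_cast (l : List String) :
    (l.map (fun s => PySem.Str.len s + 1)).sum = (pvNatStart l : Int) := by
  induction l with
  | nil => simp [pvNatStart]
  | cons p l ih => simp [pvNatStart, PySem.Str.len_eq] at *; omega

lemma pvNatStart_append (l₁ l₂ : List String) :
    pvNatStart (l₁ ++ l₂) = pvNatStart l₁ + pvNatStart l₂ := by
  simp [pvNatStart]

lemma pvNatStart_ge_len (l : List String) : l.length ≤ pvNatStart l := by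
  induction l with
  | nil => simp [pvNatStart]
  | cons p l ih => simp [pvNatStart] at *; omega

lemma pvNatStart_alt (l : List String) :
    (pvNatStart l : Int) = (l.map PySem.Str.len).sum + (l.length : Int) := by
  induction l with
  | nil => simp [pvNatStart]
  | cons p l ih => simp [pvNatStart, PySem.Str.len_eq] at *; omega

lemma pvTypes_append (pre rest : List String) (h : rest ≠ []) :
    pvTypes (pre ++ rest) = pre.flatMap (fun q => pvBlk q ++ [POS_SEP]) ++ pvTypes rest := by
  induction pre with
  | nil => simp
  | cons p pre ih =>
      have h2 : pre ++ rest ≠ [] := by simp [h]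
      simp [pvTypes, h2, ih]

lemma pvFlatMap_len (pre : List String) :
    (pre.flatMap (fun q => pvBlk q ++ [POS_SEP])).length = pvNatStart pre := by
  induction pre with
  | nil => simp [pvNatStart]
  | cons p pre ih => simp [pvNatStart, pvBlk_len] at *; omega

-- one step's plan ++ sep ++ calc positions are just the consecutive range
lemma pvStep_concat (a : Int) (p : String) :
    (((PySem.List.pyRange a (a + (p.toList.length : Int)) 1).zip (pvBlk p)).filterMap
        (fun pt => if pt.2 = POS_PLAN then some pt.1 else none)
      ++ ((PySem.List.pyRange a (a + (p.toList.length : Int)) 1).zip (pvBlk p)).filterMap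
        (fun pt => if pt.2 = POS_SEP then some pt.1 else none))
      ++ ((PySem.List.pyRange a (a + (p.toList.length : Int)) 1).zip (pvBlk p)).filterMap
        (fun pt => if pt.2 = POS_CALC then some pt.1 else none)
      = PySem.List.pyRange a (a + (p.toList.length : Int)) 1 := by
  unfold pvBlk
  rcases pvFind_cases p with h | ⟨h1, h2⟩
  · rw [if_pos (by omega)]
    have hr : (PySem.Str.len p).toNat
        = (PySem.List.pyRange a (a + (p.toList.length : Int)) 1).length := by
      rw [PySem.List.length_pyRange_one, PySem.Str.len_eq]; omega
    rw [hr, pvFz_eq, pvFz_ne _ _ _ (by decide), pvFz_ne _ _ _ (by decide)]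
    simp
  · rw [if_neg (by omega)]
    set e := PySem.Str.find p "=" with he
    set n : Nat := p.toList.length with hn
    have hsplit : PySem.List.pyRange a (a + (n : Int)) 1 =
        PySem.List.pyRange a (a + e) 1
          ++ ([a + e] ++ PySem.List.pyRange (a + e + 1) (a + (n:Int)) 1) := by
      rw [← PySem.List.pyRange_one_singleton (a + e), ← List.append_assoc,
        ← PySem.List.pyRange_one_append a (a+e) (a+e+1) (by omega) (by omega),
        ← PySem.List.pyRange_one_append a (a+e+1) (a + (n:Int)) (by omega) (by omega)]
    have hlen1 : (PySem.List.pyRange a (a + e) 1).length = e.toNat := by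
      rw [PySem.List.length_pyRange_one]; omega
    have hlen3 : (PySem.List.pyRange (a + e + 1) (a + (n:Int)) 1).length
        = ((PySem.Str.len p) - e - 1).toNat := by
      rw [PySem.List.length_pyRange_one, PySem.Str.len_eq]; omega
    have hz : (PySem.List.pyRange a (a + (n : Int)) 1).zip
        (List.replicate e.toNat POS_PLAN ++ [POS_SEP]
          ++ List.replicate ((PySem.Str.len p) - e - 1).toNat POS_CALC)
        = (PySem.List.pyRange a (a + e) 1).zip
            (List.replicate (PySem.List.pyRange a (a + e) 1).length POS_PLAN)
          ++ ([(a+e, POS_SEP)]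
          ++ (PySem.List.pyRange (a + e + 1) (a + (n:Int)) 1).zip
              (List.replicate (PySem.List.pyRange (a + e + 1) (a + (n:Int)) 1).length POS_CALC)) := by
      rw [hsplit, List.append_assoc, List.zip_append (by rw [hlen1]; simp),
        List.zip_append (by simp), hlen1, hlen3]
      simp
    rw [hz]
    simp only [List.filterMap_append, pvFz_eq,
      pvFz_ne _ _ _ (by decide : ¬ (POS_PLAN = POS_SEP)),
      pvFz_ne _ _ _ (by decide : ¬ (POS_PLAN = POS_CALC)),
      pvFz_ne _ _ _ (by decide : ¬ (POS_CALC = POS_PLAN)),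
      pvFz_ne _ _ _ (by decide : ¬ (POS_CALC = POS_SEP))]
    simp [POS_PLAN, POS_SEP, POS_CALC, hsplit]

lemma pvClassify_fold (steps : List String) (rest : List String) (m : Nat) (acc : List String)
    (hdrop : steps.drop m = rest) :
    (PySem.List.enumerate rest (m:Int)).foldl (fun types si_step =>
      let si := si_step.1
      let step := si_step.2
      let eq_pos := PySem.Str.find step "="
      let types :=
        if eq_pos < 0 then
          types ++ List.replicate (PySem.Str.len step).toNat POS_PLAN
        else
          (types ++ List.replicate eq_pos.toNat POS_PLAN ++ [POS_SEP])
            ++ List.replicate ((PySem.Str.len step) - eq_pos - 1).toNat POS_CALC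
      if si < (steps.length : Int) - 1 then types ++ [POS_SEP] else types) acc
    = acc ++ pvTypes rest := by
  induction rest generalizing m acc with
  | nil => simp [PySem.List.enumerate_nil, pvTypes]
  | cons p rest' ih =>
      have hm : m < steps.length := by
        have := congrArg List.length hdrop; simp at this; omega
      have hlen : steps.length - m = rest'.length + 1 := by
        have := congrArg List.length hdrop; simpa using this
      have hdrop' : steps.drop (m+1) = rest' := by
        have h1 : steps.drop (m+1) = (steps.drop m).tail := by
          rw [← List.drop_one, List.drop_drop]
        rw [h1, hdrop]; rfl
      rw [PySem.List.enumerate_cons, List.foldl_cons]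
      have hbody : (if PySem.Str.find p "=" < 0 then
            acc ++ List.replicate (PySem.Str.len p).toNat POS_PLAN
          else
            (acc ++ List.replicate (PySem.Str.find p "=").toNat POS_PLAN ++ [POS_SEP])
              ++ List.replicate ((PySem.Str.len p) - (PySem.Str.find p "=") - 1).toNat POS_CALC)
          = acc ++ pvBlk p := by
        unfold pvBlk; split <;> simp
      by_cases hlast : rest' = []
      · subst hlast
        have hcond : ¬ ((m:Int) < (steps.length : Int) - 1) := by
          simp at hlen; omega
        simp only [hcond, if_false, hbody, PySem.List.enumerate_nil, List.foldl_nil]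
        simp [pvTypes]
      · have hcond : ((m:Int) < (steps.length : Int) - 1) := by
          have : 0 < rest'.length := List.length_pos_of_ne_nil hlast
          omega
        simp only [hcond, if_true, hbody]
        have : ((m:Int) + 1) = ((m+1 : Nat) : Int) := by push_cast; ring
        rw [this, ih (m+1) _ hdrop']
        simp [pvTypes, hlast]

lemma pvClassify_eq (s : String) :
    classify_output_positions s = pvTypes ((PySem.Str.split? s ",").getD []) := by
  unfold classify_output_positions
  have h := pvClassify_fold ((PySem.Str.split? s ",").getD []) ((PySem.Str.split? s ",").getD [])
    0 [] (by simp)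
  simpa using h

-- the slice of the types list for the step with parts `pre` before it is exactly its block
lemma pvTypes_slice_gen (pre : List String) (p : String) (rest' : List String) :
    ((pvTypes (pre ++ p :: rest')).drop (pvNatStart pre)).take p.toList.length = pvBlk p := by
  obtain ⟨X, hX⟩ : ∃ X, pvTypes (p :: rest') = pvBlk p ++ X := by
    cases rest' with
    | nil => exact ⟨[], by simp [pvTypes]⟩
    | cons q t => exact ⟨[POS_SEP] ++ pvTypes (q :: t), by simp [pvTypes]⟩
  rw [pvTypes_append _ _ (by simp), hX,
    List.drop_left' (pvFlatMap_len _),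
    List.take_left' (pvBlk_len p)]

lemma pvTypes_slice (steps : List String) (m : Nat) (p : String) (rest' : List String)
    (hdrop : steps.drop m = p :: rest') :
    ((pvTypes steps).drop (pvNatStart (steps.take m))).take p.toList.length = pvBlk p := by
  have hsteps : steps = steps.take m ++ p :: rest' := by
    conv_lhs => rw [← List.take_append_drop m steps, hdrop]
  rw [show pvTypes steps = pvTypes (steps.take m ++ p :: rest') from by rw [← hsteps]]
  exact pvTypes_slice_gen _ _ _

-- one iteration of A's main loop, evaluated
lemma pvBody_eval (steps : List String) (m : Nat) (p : String) (rest' : List String)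
    (acc : List Int) (hdrop : steps.drop m = p :: rest') :
    (fun (order : List Int) (si_step : Int × String) =>
      let si := si_step.1
      let step_str := si_step.2
      let start := ((PySem.List.slice steps none (some si)).map (fun s => PySem.Str.len s + 1)).sum
      let step_len := PySem.Str.len step_str
      let step_range := PySem.List.pyRange start (start + step_len) 1
      let step_types := PySem.List.slice (pvTypes steps) (some start) (some (start + step_len))
      let plan_pos := (step_range.zip step_types).filterMap (fun pt => if pt.2 = POS_PLAN then some pt.1 else none)
      let sep_pos := (step_range.zip step_types).filterMap (fun pt => if pt.2 = POS_SEP then some pt.1 else none)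
      let calc_pos := (step_range.zip step_types).filterMap (fun pt => if pt.2 = POS_CALC then some pt.1 else none)
      let order := order ++ (plan_pos ++ sep_pos ++ calc_pos)
      if si < (steps.length : Int) - 1 then order ++ [start + step_len] else order) acc ((m:Int), p)
    = if (m:Int) < (steps.length : Int) - 1 then
        acc ++ PySem.List.pyRange ((pvNatStart (steps.take m) : Int))
          ((pvNatStart (steps.take (m+1)) : Int)) 1
      else
        acc ++ PySem.List.pyRange ((pvNatStart (steps.take m) : Int))
          ((pvNatStart steps : Int) - 1) 1 := by
  have hm : m < steps.length := by
    have := congrArg List.length hdrop; simp at this; omega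
  have hsteps : steps = steps.take m ++ p :: rest' := by
    conv_lhs => rw [← List.take_append_drop m steps, hdrop]
  have htake1 : steps.take (m+1) = steps.take m ++ [p] := by
    conv_lhs => rw [hsteps]
    have hl : (steps.take m).length = m := List.length_take_of_le (by omega)
    rw [List.take_append, List.take_of_length_le (by omega), hl]
    simp
  have hstart1 : pvNatStart (steps.take (m+1))
      = pvNatStart (steps.take m) + (p.toList.length + 1) := by
    rw [htake1, pvNatStart_append]; simp [pvNatStart]
  have htot : pvNatStart steps
      = pvNatStart (steps.take m) + (p.toList.length + 1) + pvNatStart rest' := by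
    conv_lhs => rw [hsteps]
    rw [pvNatStart_append]; simp [pvNatStart]; omega
  simp only [PySem.List.slice_to_natCast]
  rw [pvNatStart_cast (steps.take m), PySem.Str.len_eq p,
    PySem.List.slice_natCast_add, pvTypes_slice steps m p rest' hdrop,
    pvStep_concat ((pvNatStart (steps.take m) : Int)) p]
  by_cases hc : (m:Int) < (steps.length : Int) - 1
  · rw [if_pos hc, if_pos hc, hstart1]
    have hcast : ((pvNatStart (steps.take m) + (p.toList.length + 1) : Nat) : Int)
        = ((pvNatStart (steps.take m) : Int) + (p.toList.length : Int)) + 1 := by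
      push_cast; ring
    rw [hcast, PySem.List.pyRange_one_succ_right (by omega), ← List.append_assoc]
  · rw [if_neg hc, if_neg hc]
    have hrest : rest' = [] := by
      have : steps.length - m = rest'.length + 1 := by
        have := congrArg List.length hdrop; simpa using this
      have : rest'.length = 0 := by omega
      exact List.eq_nil_of_length_eq_zero this
    subst hrest
    have hlast : (pvNatStart steps : Int) - 1
        = (pvNatStart (steps.take m) : Int) + (p.toList.length : Int) := by
      rw [htot]; push_cast [pvNatStart]; simp; ring
    rw [hlast]

lemma pvMain_fold_aux (steps : List String) (rest : List String) (m : Nat) (acc : List Int)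
    (hdrop : steps.drop m = rest) :
    (PySem.List.enumerate rest (m:Int)).foldl (fun order si_step =>
      let si := si_step.1
      let step_str := si_step.2
      let start := ((PySem.List.slice steps none (some si)).map (fun s => PySem.Str.len s + 1)).sum
      let step_len := PySem.Str.len step_str
      let step_range := PySem.List.pyRange start (start + step_len) 1
      let step_types := PySem.List.slice (pvTypes steps) (some start) (some (start + step_len))
      let plan_pos := (step_range.zip step_types).filterMap (fun pt => if pt.2 = POS_PLAN then some pt.1 else none)
      let sep_pos := (step_range.zip step_types).filterMap (fun pt => if pt.2 = POS_SEP then some pt.1 else none)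
      let calc_pos := (step_range.zip step_types).filterMap (fun pt => if pt.2 = POS_CALC then some pt.1 else none)
      let order := order ++ (plan_pos ++ sep_pos ++ calc_pos)
      if si < (steps.length : Int) - 1 then order ++ [start + step_len] else order) acc
    = acc ++ PySem.List.pyRange ((pvNatStart (steps.take m) : Int))
        ((pvNatStart steps : Int) - 1) 1 := by
  induction rest generalizing m acc with
  | nil =>
      have hm : steps.length ≤ m := by
        have := congrArg List.length hdrop; simp at this; omega
      have htake : steps.take m = steps := List.take_of_length_le hm
      rw [PySem.List.enumerate_nil, List.foldl_nil, htake,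
        PySem.List.pyRange_one_eq_nil (by omega), List.append_nil]
  | cons p rest' ih =>
      have hm : m < steps.length := by
        have := congrArg List.length hdrop; simp at this; omega
      have hlen : steps.length - m = rest'.length + 1 := by
        have := congrArg List.length hdrop; simpa using this
      have hdrop' : steps.drop (m+1) = rest' := by
        have h1 : steps.drop (m+1) = (steps.drop m).tail := by
          rw [← List.drop_one, List.drop_drop]
        rw [h1, hdrop]; rfl
      have hsteps : steps = steps.take m ++ p :: rest' := by
        conv_lhs => rw [← List.take_append_drop m steps, hdrop]
      have htake1 : steps.take (m+1) = steps.take m ++ [p] := by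
        conv_lhs => rw [hsteps]
        have hl : (steps.take m).length = m := List.length_take_of_le (by omega)
        rw [List.take_append, List.take_of_length_le (by omega), hl]
        simp
      have hstart1 : pvNatStart (steps.take (m+1))
          = pvNatStart (steps.take m) + (p.toList.length + 1) := by
        rw [htake1, pvNatStart_append]; simp [pvNatStart]
      rw [PySem.List.enumerate_cons]
      simp only [List.foldl_cons]
      have hb := pvBody_eval steps m p rest' acc hdrop
      simp only [] at hb
      rw [hb]
      by_cases hc : (m:Int) < (steps.length : Int) - 1
      · rw [if_pos hc]
        have ih' := ih (m+1) (acc ++ PySem.List.pyRange ((pvNatStart (steps.take m) : Int))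
          ((pvNatStart (steps.take (m+1)) : Int)) 1) hdrop'
        simp only [] at ih'
        rw [show ((m:Int) + 1) = ((m+1 : Nat) : Int) by push_cast; ring,
          ih', List.append_assoc]
        congr 1
        have hrest : rest' ≠ [] := by
          intro h; subst h; simp at hlen; omega
        have h1 : 1 ≤ pvNatStart rest' := by
          have := pvNatStart_ge_len rest'
          have := List.length_pos_of_ne_nil hrest
          omega
        have htot2 : pvNatStart steps
            = pvNatStart (steps.take (m+1)) + pvNatStart rest' := by
          have : steps = steps.take (m+1) ++ rest' := by
            conv_lhs => rw [← List.take_append_drop (m+1) steps, hdrop']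
          conv_lhs => rw [this, pvNatStart_append]
        rw [← PySem.List.pyRange_one_append (↑(pvNatStart (steps.take m)))
          (↑(pvNatStart (steps.take (m+1)))) (↑(pvNatStart steps) - 1)
          (by rw [hstart1]; push_cast; omega)
          (by rw [htot2]; push_cast; omega)]
      · rw [if_neg hc]
        have hrest : rest' = [] := by
          have : rest'.length = 0 := by omega
          exact List.eq_nil_of_length_eq_zero this
        subst hrest
        rw [PySem.List.enumerate_nil, List.foldl_nil]

lemma pvMain_fold (s : String) :
    build_oracle_order_step_seq s =
      PySem.List.pyRange 0 ((pvNatStart ((PySem.Str.split? s ",").getD []) : Int) - 1) 1 := by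
  unfold build_oracle_order_step_seq
  rw [pvClassify_eq]
  have h := pvMain_fold_aux ((PySem.Str.split? s ",").getD []) ((PySem.Str.split? s ",").getD [])
    0 [] (by simp)
  simpa [pvNatStart] using h

-- ===== VERDICT (by name: the statement is the Claim_ definition above) =====
theorem build_oracle_order_step_seq_spec : Claim_equal_build_oracle_order_step_seq := by
  intro s _
  unfold Spec_build_oracle_order_step_seq build_oracle_order_step_seq_alt
  rw [pvMain_fold s, pvNatStart_alt]
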